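-- pv_equiv track=rewrite | github.com/Shaunakm07/BytePairTokeniser | src/tokeniser.py | find_lexically_highest
-- ===== SOURCE A (Python) =====
-- def find_lexically_highest(byte_pairs):
--     max_count = max([v for k,v in byte_pairs.items()])
--     max_pairs = []
--
--     for k,v in byte_pairs.items():
--         if v == max_count:
--             max_pairs.append(k)
--
--     heighest_lexical = max(max_pairs)
--     heighest_lexical_string = "".join(heighest_lexical)
--
--     return heighest_lexical_string, heighest_lexical
-- ===== SOURCE B (Python) =====
-- def find_lexically_highest(byte_pairs):
--     best = max(byte_pairs.items(), key=lambda kv: (kv[1], kv[0]))[0]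
--     return "".join(best), best
-- ===== Notes on version B (the rewrite author's own statement) =====
-- stated objective: idiomatic
-- what changed: Replaces A's three passes (max over values, filter of maximal keys, max over that list) by a single max over the items with the composite key (count, key), which selects the lexically highest key among the most frequent in one pass.
import Mathlib
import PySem

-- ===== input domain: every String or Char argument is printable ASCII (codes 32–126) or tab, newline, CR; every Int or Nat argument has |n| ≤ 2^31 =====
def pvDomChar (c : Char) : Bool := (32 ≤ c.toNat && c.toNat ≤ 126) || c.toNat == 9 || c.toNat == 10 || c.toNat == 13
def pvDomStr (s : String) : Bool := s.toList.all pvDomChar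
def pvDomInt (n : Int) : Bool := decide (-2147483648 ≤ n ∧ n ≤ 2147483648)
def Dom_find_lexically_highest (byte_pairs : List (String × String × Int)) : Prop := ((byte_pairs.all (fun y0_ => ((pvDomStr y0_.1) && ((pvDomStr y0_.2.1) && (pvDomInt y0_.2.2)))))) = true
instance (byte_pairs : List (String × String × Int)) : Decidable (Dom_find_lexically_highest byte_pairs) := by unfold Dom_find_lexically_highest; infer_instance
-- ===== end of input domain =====

-- B replaces A's three passes (max of counts, filter of maximal keys, max of those keys)
-- by a single max over the items with the composite key (count, key); same O(n) cost, more idiomatic.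


-- Python's comparison of the key tuple (a, b) of two strings: lexicographic
def pvPairKey (k : String × String) : String ×ₗ String := toLex k
-- Python's comparison of the tuple (count, key): lexicographic
def pvTripKey (kv : (String × String) × Int) : Int ×ₗ (String ×ₗ String) := toLex (kv.2, pvPairKey kv.1)

-- the dict argument, reassociated from the flattened triples to ((k1,k2), v) pairs
def pvDictOf (byte_pairs : List (String × String × Int)) : PySem.Dict (String × String) Int :=
  PySem.Dict.ofList (byte_pairs.map (fun p => ((p.1, p.2.1), p.2.2)))

-- ===== PORT A =====
def find_lexically_highest (byte_pairs : List (String × String × Int)) : String × (String × String) :=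
  match PySem.List.max? ((pvDictOf byte_pairs).items.map (fun kv => kv.2)) (fun v => v) with
  | none => ("", ("", ""))   -- Python: max([]) raises ValueError; excluded by Pre_
  | some max_count =>
    match PySem.List.max?
      ((pvDictOf byte_pairs).items.foldl
        (fun acc kv => if kv.2 == max_count then acc ++ [kv.1] else acc) []) pvPairKey with
    | none => ("", ("", ""))  -- Python: max([]) raises; unreachable (max_count is attained)
    | some hl => (hl.1 ++ hl.2, hl)

-- ===== PORT B =====
def find_lexically_highest_alt (byte_pairs : List (String × String × Int)) : String × (String × String) :=
  match PySem.List.max? (pvDictOf byte_pairs).items pvTripKey with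
  | none => ("", ("", ""))   -- Python: max on the empty dict raises ValueError; excluded by Pre_
  | some best => (best.1.1 ++ best.1.2, best.1)

-- ===== PRECONDITION & SPEC =====
-- Pre_ excludes only the empty dict, on which both Pythons raise ValueError (max of an empty sequence).
def Pre_find_lexically_highest (byte_pairs : List (String × String × Int)) : Prop := byte_pairs ≠ []
instance (byte_pairs : List (String × String × Int)) : Decidable (Pre_find_lexically_highest byte_pairs) := by unfold Pre_find_lexically_highest; infer_instance
def pvWitness_find_lexically_highest : (List (String × String × Int)) := [("a", "b", 1), ("c", "a", 1)]
def Spec_find_lexically_highest (byte_pairs : List (String × String × Int)) (out : String × (String × String)) : Prop := out = find_lexically_highest_alt byte_pairs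
instance (byte_pairs : List (String × String × Int)) (out : String × (String × String)) : Decidable (Spec_find_lexically_highest byte_pairs out) := by unfold Spec_find_lexically_highest; infer_instance

-- ===== CLAIM (what is proved, stated in full; the proofs are below) =====
def Claim_equal_find_lexically_highest : Prop := ∀ (byte_pairs : List (String × String × Int)), Dom_find_lexically_highest byte_pairs → Pre_find_lexically_highest byte_pairs → Spec_find_lexically_highest byte_pairs (find_lexically_highest byte_pairs)

-- ===== LEMMAS AND PROOFS =====

theorem pv_update_items_le {d : PySem.Dict (String × String) Int}
    (ps : List ((String × String) × Int)) :
    d.items.length ≤ (d.update ps).items.length := by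
  induction ps generalizing d with
  | nil => simp [PySem.Dict.update]
  | cons p rest ih =>
    have h1 : d.items.length ≤ (d.insert p.1 p.2).items.length := by
      simp only [PySem.Dict.insert]
      split <;> simp
    calc d.items.length ≤ (d.insert p.1 p.2).items.length := h1
      _ ≤ ((d.insert p.1 p.2).update rest).items.length := ih
      _ = (d.update (p :: rest)).items.length := by
            simp [PySem.Dict.update]

theorem pv_dict_items_ne_nil {byte_pairs : List (String × String × Int)}
    (h : byte_pairs ≠ []) : (pvDictOf byte_pairs).items ≠ [] := by
  obtain ⟨p, rest, rfl⟩ := List.exists_cons_of_ne_nil h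
  intro hcon
  have h1 : (PySem.Dict.empty.insert (p.1, p.2.1) p.2.2).items.length ≤
      (pvDictOf (p :: rest)).items.length := by
    have := pv_update_items_le (d := PySem.Dict.empty.insert (p.1, p.2.1) p.2.2)
      (rest.map (fun q => ((q.1, q.2.1), q.2.2)))
    simpa [pvDictOf, PySem.Dict.ofList, PySem.Dict.update] using this
  have h2 : (PySem.Dict.empty.insert (p.1, p.2.1) p.2.2).items.length = 1 := by
    simp [PySem.Dict.insert, PySem.Dict.empty, PySem.Dict.contains]
  rw [hcon] at h1
  simp [h2] at h1

-- the core selection lemma: on any nonempty item list, A's three-pass choice and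
-- B's single composite-key choice pick the same key pair
theorem pv_pick_eq (items : List ((String × String) × Int)) (_hne : items ≠ [])
    {mc : Int} {best : (String × String) × Int}
    (hmc : PySem.List.max? (items.map (fun kv => kv.2)) (fun v => v) = some mc)
    (hbest : PySem.List.max? items pvTripKey = some best) :
    PySem.List.max? ((items.filter (fun kv => kv.2 == mc)).map (fun kv => kv.1))
      pvPairKey = some best.1 := by
  -- mc is attained
  have hmem : mc ∈ items.map (fun kv => kv.2) := PySem.List.max?_mem hmc
  obtain ⟨kv0, hkv0, hkv0v⟩ := List.mem_map.1 hmem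
  have hmax : ∀ v ∈ items.map (fun kv => kv.2), v ≤ mc := by
    intro v hv; exact PySem.List.max?_isMax hmc v hv
  -- best facts
  have hbmem : best ∈ items := PySem.List.max?_mem hbest
  have hbmax : ∀ y ∈ items, pvTripKey y ≤ pvTripKey best :=
    fun y hy => PySem.List.max?_isMax hbest y hy
  -- best.2 = mc
  have hble : best.2 ≤ mc := hmax _ (List.mem_map.2 ⟨best, hbmem, rfl⟩)
  have hkv0le : pvTripKey kv0 ≤ pvTripKey best := hbmax kv0 hkv0
  have hkv0le' := Prod.Lex.toLex_le_toLex.1 hkv0le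
  have hb2 : best.2 = mc := by
    rcases hkv0le' with h | ⟨h, _⟩
    · exact absurd (hkv0v ▸ h) (not_lt.2 hble)
    · omega
  -- the filtered key list contains best.1 and kv0.1, hence is nonempty
  have hbfilt : best ∈ items.filter (fun kv => kv.2 == mc) :=
    List.mem_filter.2 ⟨hbmem, by simp [hb2]⟩
  have hbin : best.1 ∈ (items.filter (fun kv => kv.2 == mc)).map (fun kv => kv.1) :=
    List.mem_map.2 ⟨best, hbfilt, rfl⟩
  -- so the inner max? returns some hl
  obtain ⟨hl, hhl⟩ : ∃ hl, PySem.List.max?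
      ((items.filter (fun kv => kv.2 == mc)).map (fun kv => kv.1)) pvPairKey = some hl := by
    cases hcase : PySem.List.max?
        ((items.filter (fun kv => kv.2 == mc)).map (fun kv => kv.1)) pvPairKey with
    | none =>
      rw [PySem.List.max?_eq_none_iff] at hcase
      rw [hcase] at hbin; cases hbin
    | some hl => exact ⟨hl, rfl⟩
  -- hl comes from an entry with count mc
  have hhlmem := PySem.List.max?_mem hhl
  obtain ⟨e, hef, he1⟩ := List.mem_map.1 hhlmem
  have he := List.mem_filter.1 hef
  have he2 : e.2 = mc := by simpa using he.2
  -- pairKey hl ≤ pairKey best.1 : from tripKey e ≤ tripKey best with equal counts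
  have hle1 : pvPairKey hl ≤ pvPairKey best.1 := by
    have := Prod.Lex.toLex_le_toLex.1 (hbmax e he.1)
    rcases this with h | ⟨_, h⟩
    · exact absurd h (by simp [pvTripKey] at *; omega)
    · simpa [he1] using h
  -- pairKey best.1 ≤ pairKey hl : best.1 is in the filtered list
  have hle2 : pvPairKey best.1 ≤ pvPairKey hl := PySem.List.max?_isMax hhl _ hbin
  have : pvPairKey hl = pvPairKey best.1 := le_antisymm hle1 hle2
  have hkey : hl = best.1 := by
    simpa [pvPairKey, toLex_inj] using this
  rw [hhl, hkey]

-- ===== VERDICT (by name: the statement is the Claim_ definition above) =====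
theorem find_lexically_highest_spec : Claim_equal_find_lexically_highest := by
  intro byte_pairs _ hpre
  unfold Spec_find_lexically_highest find_lexically_highest find_lexically_highest_alt
  have hne : (pvDictOf byte_pairs).items ≠ [] := pv_dict_items_ne_nil hpre
  -- both outer max? are some
  cases hmc : PySem.List.max? ((pvDictOf byte_pairs).items.map (fun kv => kv.2)) (fun v => v) with
  | none =>
    rw [PySem.List.max?_eq_none_iff, List.map_eq_nil_iff] at hmc
    exact absurd hmc hne
  | some mc =>
    cases hbest : PySem.List.max? (pvDictOf byte_pairs).items pvTripKey with
    | none =>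
      rw [PySem.List.max?_eq_none_iff] at hbest
      exact absurd hbest hne
    | some best =>
      have hfoldl := PySem.List.foldl_append_if (fun kv => kv.2 == mc)
        (fun kv : (String × String) × Int => kv.1) (pvDictOf byte_pairs).items ([])
      have hp := pv_pick_eq (pvDictOf byte_pairs).items hne hmc hbest
      show (match PySem.List.max?
          ((pvDictOf byte_pairs).items.foldl
            (fun acc kv => if kv.2 == mc then acc ++ [kv.1] else acc) []) pvPairKey with
        | none => (("" : String), (("" : String), ("" : String)))
        | some hl => (hl.1 ++ hl.2, hl)) = (best.1.1 ++ best.1.2, best.1)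
      rw [hfoldl, List.nil_append, hp]
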